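-- pv_equiv track=rewrite | github.com/luckygirl-syndrome/back-end | app/chat/logic/impulse_calculator.py | parse_persona
-- ===== SOURCE A (Python) =====
-- def parse_persona(persona_code):
--     traits = {'D':0, 'N':0, 'S':0, 'A':0, 'T':0, 'M':0}
--     if not persona_code:
--         return traits
--
--     # 1. 하이픈 제거
--     clean_code = str(persona_code).replace('-', '')
--
--     # 2. 한 글자씩 검사 (예: "SDM" -> 'S', 'D', 'M')
--     for char in clean_code:
--         upper_char = char.upper()
--         if upper_char in traits:
--             traits[upper_char] = 1
--     return traits
-- ===== SOURCE B (Python) =====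
-- def parse_persona(persona_code):
--     keys = ('D', 'N', 'S', 'A', 'T', 'M')
--     if not persona_code:
--         return {k: 0 for k in keys}
--     charset = {c.upper() for c in str(persona_code).replace('-', '')}
--     return {k: (1 if k in charset else 0) for k in keys}
-- ===== Notes on version B (the rewrite author's own statement) =====
-- stated objective: idiomatic
-- what changed: Instead of mutating a flag dict while scanning the input characters, B builds a set of per-character uppercased letters once and then constructs the result dict by iterating over the six fixed trait keys with a membership test.
import Mathlib
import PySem

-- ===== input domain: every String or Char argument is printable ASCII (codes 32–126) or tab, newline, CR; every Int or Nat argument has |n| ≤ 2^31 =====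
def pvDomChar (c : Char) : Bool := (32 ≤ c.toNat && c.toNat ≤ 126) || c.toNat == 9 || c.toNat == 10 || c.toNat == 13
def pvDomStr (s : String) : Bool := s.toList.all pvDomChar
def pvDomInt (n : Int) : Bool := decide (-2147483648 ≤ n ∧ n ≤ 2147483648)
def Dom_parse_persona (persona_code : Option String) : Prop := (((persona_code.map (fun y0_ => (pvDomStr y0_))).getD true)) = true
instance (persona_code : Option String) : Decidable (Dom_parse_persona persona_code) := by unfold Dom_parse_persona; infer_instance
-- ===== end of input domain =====

-- B is a different decomposition: A mutates a flag dict while scanning the characters;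
-- B builds a set of per-character uppercased letters once and maps over the six fixed keys.
-- (On the ASCII domain, Python's one-char str.upper() is a single character: ported as upperChar.)

-- ===== PORT A =====
def pvTraits0 : PySem.Dict String Int :=
  PySem.Dict.ofList [("D", 0), ("N", 0), ("S", 0), ("A", 0), ("T", 0), ("M", 0)]

def parse_persona (persona_code : Option String) : List (String × Int) :=
  match persona_code with
  | none => pvTraits0.items
  | some s =>
    if s = "" then pvTraits0.items
    else
      let clean_code := PySem.Str.replace s "-" ""
      (clean_code.toList.foldl
        (fun traits char =>
          let upper_char := String.ofList [PySem.Chars.upperChar char]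
          if traits.contains upper_char then traits.insert upper_char 1 else traits)
        pvTraits0).items

-- ===== PORT B =====
def pvKeys : List String := ["D", "N", "S", "A", "T", "M"]

def parse_persona_alt (persona_code : Option String) : List (String × Int) :=
  match persona_code with
  | none => pvKeys.map (fun k => (k, (0 : Int)))
  | some s =>
    if s = "" then pvKeys.map (fun k => (k, (0 : Int)))
    else
      let charset : PySem.Set String :=
        PySem.Set.ofList ((PySem.Str.replace s "-" "").toList.map
          (fun c => String.ofList [PySem.Chars.upperChar c]))
      pvKeys.map (fun k => (k, if PySem.Set.contains charset k then (1 : Int) else 0))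

-- ===== PRECONDITION & SPEC =====
def Spec_parse_persona (persona_code : Option String) (out : List (String × Int)) : Prop := out = parse_persona_alt persona_code
instance (persona_code : Option String) (out : List (String × Int)) : Decidable (Spec_parse_persona persona_code out) := by unfold Spec_parse_persona; infer_instance

-- ===== CLAIM (what is proved, stated in full; the proofs are below) =====
def Claim_equal_parse_persona : Prop := ∀ (persona_code : Option String), Dom_parse_persona persona_code → Spec_parse_persona persona_code (parse_persona persona_code)

-- ===== LEMMAS AND PROOFS =====

def pvStep (d : PySem.Dict String Int) (c : Char) : PySem.Dict String Int :=
  let u := String.ofList [PySem.Chars.upperChar c]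
  if d.contains u then d.insert u 1 else d

theorem pvStep_keys (d : PySem.Dict String Int) (c : Char) : (pvStep d c).keys = d.keys := by
  unfold pvStep
  by_cases h : d.contains (String.ofList [PySem.Chars.upperChar c])
  · simpa [h] using PySem.Dict.keys_insert_of_contains d 1 h
  · simp [h]

theorem pvFold_keys (cs : List Char) (d : PySem.Dict String Int) :
    (cs.foldl pvStep d).keys = d.keys := by
  induction cs generalizing d with
  | nil => rfl
  | cons c cs ih => simpa [List.foldl, pvStep_keys] using ih (pvStep d c)

theorem pvStep_contains (d : PySem.Dict String Int) (c : Char) (k : String) :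
    (pvStep d c).contains k = d.contains k := by
  rw [PySem.Dict.contains_eq_decide_mem_keys, PySem.Dict.contains_eq_decide_mem_keys, pvStep_keys]

theorem pvStep_getD (d : PySem.Dict String Int) (c : Char) (k : String) :
    (pvStep d c).getD k 0 =
      if d.contains k = true ∧ String.ofList [PySem.Chars.upperChar c] = k then 1
      else d.getD k 0 := by
  unfold pvStep
  by_cases he : String.ofList [PySem.Chars.upperChar c] = k
  · subst he
    by_cases hc : d.contains (String.ofList [PySem.Chars.upperChar c]) = true
    · simp [hc, PySem.Dict.getD_insert_self]
    · simp [hc]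
  · by_cases hc : d.contains (String.ofList [PySem.Chars.upperChar c]) = true
    · simp only [hc, if_pos, he, and_false, if_neg, not_false_iff]
      exact PySem.Dict.getD_insert_of_ne d 1 0 (fun h => he h.symm)
    · simp [hc, he]

theorem pvFold_getD (cs : List Char) (d : PySem.Dict String Int) (k : String) :
    (cs.foldl pvStep d).getD k 0 =
      if d.contains k = true ∧ (∃ c ∈ cs, String.ofList [PySem.Chars.upperChar c] = k) then 1
      else d.getD k 0 := by
  induction cs generalizing d with
  | nil => rw [List.foldl_nil]; simp
  | cons c cs ih =>
    rw [List.foldl_cons, ih (pvStep d c), pvStep_contains, pvStep_getD]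
    by_cases hd : d.contains k = true <;>
      by_cases h1 : String.ofList [PySem.Chars.upperChar c] = k <;>
        by_cases h2 : ∃ c' ∈ cs, String.ofList [PySem.Chars.upperChar c'] = k <;>
          simp [hd, h1, h2]

theorem pvTraits0_keys : pvTraits0.keys = pvKeys := by rfl

set_option maxRecDepth 2000 in
theorem pvTraits0_nodup : pvTraits0.keys.Nodup := by rw [pvTraits0_keys]; decide

theorem pvMain (cs : List Char) :
    (cs.foldl pvStep pvTraits0).items =
      pvKeys.map (fun k =>
        (k, if PySem.Set.contains (PySem.Set.ofList (cs.map (fun c => String.ofList [PySem.Chars.upperChar c]))) k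
            then (1 : Int) else 0)) := by
  have hnd : (cs.foldl pvStep pvTraits0).keys.Nodup := by
    rw [pvFold_keys]; exact pvTraits0_nodup
  rw [PySem.Dict.items_eq_map_keys _ hnd 0, pvFold_keys, pvTraits0_keys]
  apply List.map_congr_left
  intro k hk
  rw [pvFold_getD]
  have hck : pvTraits0.contains k = true := by
    rw [PySem.Dict.contains_iff_mem_keys, pvTraits0_keys]; exact hk
  have hg0 : pvTraits0.getD k 0 = 0 := by
    fin_cases hk <;> rfl
  rw [hg0]
  simp only [hck, true_and]
  have hiff : (∃ c ∈ cs, String.ofList [PySem.Chars.upperChar c] = k) ↔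
      PySem.Set.contains
        (PySem.Set.ofList (cs.map (fun c => String.ofList [PySem.Chars.upperChar c]))) k = true := by
    simp [PySem.Set.contains, PySem.Set.mem_ofList, eq_comm]
  by_cases h : (∃ c ∈ cs, String.ofList [PySem.Chars.upperChar c] = k)
  · rw [if_pos h, if_pos (hiff.mp h)]
  · rw [if_neg h, if_neg (fun hb => h (hiff.mpr hb))]

-- ===== VERDICT (by name: the statement is the Claim_ definition above) =====
theorem parse_persona_spec : Claim_equal_parse_persona := by
  intro persona_code _
  unfold Spec_parse_persona parse_persona parse_persona_alt
  match persona_code with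
  | none => rfl
  | some s =>
    by_cases hs : s = ""
    · simp only [hs, if_pos]; rfl
    · simp only [hs]
      exact pvMain _
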